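-- pv_equiv track=rewrite | github.com/IOBratkova/neural_networks | nw4/new_per/perceptron_new.py | _select_element
-- ===== SOURCE A (Python) =====
-- def _select_element(teta, uvh, l, imagen):
--     list_inv = []
--     if uvh[imagen] < teta:
--         list_inv.append(imagen)
--     for i in range(len(uvh)):
--         if i == imagen:
--             continue
--         if uvh[i] >= teta:
--             list_inv.append(i)
--     if len(list_inv) == 0:
--         return None
--     return list_inv[l % len(list_inv)]
-- ===== SOURCE B (Python) =====
-- def _select_element(teta, uvh, l, imagen):
--     # Two-pass counting/rank-walk instead of materialising the index list.
--     count = 1 if uvh[imagen] < teta else 0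
--     for i in range(len(uvh)):
--         if i != imagen and uvh[i] >= teta:
--             count += 1
--     if count == 0:
--         return None
--     target = l % count
--     if uvh[imagen] < teta:
--         if target == 0:
--             return imagen
--         target -= 1
--     for i in range(len(uvh)):
--         if i != imagen and uvh[i] >= teta:
--             if target == 0:
--                 return i
--             target -= 1
-- ===== Notes on version B (the rewrite author's own statement) =====
-- stated objective: alternative
-- what changed: B never builds the list of selected indices: a first pass counts them, target = l % count, and a second pass walks the same selection order decrementing target and returns the index where it reaches 0.
import Mathlib
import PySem

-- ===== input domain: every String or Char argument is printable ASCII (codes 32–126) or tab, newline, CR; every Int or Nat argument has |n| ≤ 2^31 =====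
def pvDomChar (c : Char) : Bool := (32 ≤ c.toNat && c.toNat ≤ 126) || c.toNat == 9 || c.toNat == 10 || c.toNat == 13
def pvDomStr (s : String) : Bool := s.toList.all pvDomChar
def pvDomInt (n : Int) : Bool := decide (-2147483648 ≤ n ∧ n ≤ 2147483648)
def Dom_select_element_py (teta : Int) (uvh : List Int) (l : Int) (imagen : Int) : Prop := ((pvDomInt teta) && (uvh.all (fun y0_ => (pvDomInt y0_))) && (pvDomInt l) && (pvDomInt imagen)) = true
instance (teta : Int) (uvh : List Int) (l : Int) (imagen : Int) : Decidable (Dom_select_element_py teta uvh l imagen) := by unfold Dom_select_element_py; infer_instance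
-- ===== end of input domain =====

-- B replaces A's materialised list of selected indices by a counting pass plus a
-- rank-walk second pass (same selection order), O(1) extra space; same asymptotic time.

-- ===== PORT A =====
def select_element_py (teta : Int) (uvh : List Int) (l : Int) (imagen : Int) : Option Int :=
  match PySem.List.pyGet? uvh imagen with
  | none => none  -- IndexError on uvh[imagen]; excluded by Pre_
  | some v =>
    let list0 : List Int := if v < teta then [imagen] else []
    let list_inv : List Int :=
      (PySem.List.pyRange 0 (PySem.List.len uvh) 1).foldl
        (fun acc i =>
          if i = imagen then acc
          else if teta ≤ PySem.List.pyGetD uvh i 0 then acc ++ [i] else acc) list0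
    if list_inv.length = 0 then none
    else PySem.List.pyGet? list_inv (PySem.Int.mod l (PySem.List.len list_inv))

-- ===== PORT B =====
-- second pass of B: walk the candidate indices, decrementing target on each selected one
def pvPickB (teta imagen : Int) (uvh : List Int) : List Int → Int → Option Int
  | [], _ => none
  | i :: rest, t =>
    if i ≠ imagen ∧ teta ≤ PySem.List.pyGetD uvh i 0 then
      if t = 0 then some i else pvPickB teta imagen uvh rest (t - 1)
    else pvPickB teta imagen uvh rest t

def select_element_py_alt (teta : Int) (uvh : List Int) (l : Int) (imagen : Int) : Option Int :=
  match PySem.List.pyGet? uvh imagen with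
  | none => none  -- IndexError on uvh[imagen]; excluded by Pre_
  | some v =>
    let count : Int :=
      (if v < teta then 1 else 0) +
        (PySem.List.pyRange 0 (PySem.List.len uvh) 1).foldl
          (fun c i => if i ≠ imagen ∧ teta ≤ PySem.List.pyGetD uvh i 0 then c + 1 else c) 0
    if count = 0 then none
    else
      let target : Int := PySem.Int.mod l count
      if v < teta then
        if target = 0 then some imagen
        else pvPickB teta imagen uvh (PySem.List.pyRange 0 (PySem.List.len uvh) 1) (target - 1)
      else pvPickB teta imagen uvh (PySem.List.pyRange 0 (PySem.List.len uvh) 1) target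

-- ===== PRECONDITION & SPEC =====
-- Pre_ excludes exactly the inputs where uvh[imagen] raises IndexError in Python.
def Pre_select_element_py (teta : Int) (uvh : List Int) (l : Int) (imagen : Int) : Prop :=
  PySem.Raise.InRange uvh.length imagen
instance (teta : Int) (uvh : List Int) (l : Int) (imagen : Int) : Decidable (Pre_select_element_py teta uvh l imagen) := by unfold Pre_select_element_py; infer_instance

def pvWitness_select_element_py : Int × List Int × Int × Int := (2, [1, 3, 0], 5, 0)

def Spec_select_element_py (teta : Int) (uvh : List Int) (l : Int) (imagen : Int) (out : Option Int) : Prop := out = select_element_py_alt teta uvh l imagen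
instance (teta : Int) (uvh : List Int) (l : Int) (imagen : Int) (out : Option Int) : Decidable (Spec_select_element_py teta uvh l imagen out) := by unfold Spec_select_element_py; infer_instance

-- ===== CLAIM (what is proved, stated in full; the proofs are below) =====
def Claim_equal_select_element_py : Prop := ∀ (teta : Int) (uvh : List Int) (l : Int) (imagen : Int), Dom_select_element_py teta uvh l imagen → Pre_select_element_py teta uvh l imagen → Spec_select_element_py teta uvh l imagen (select_element_py teta uvh l imagen)

-- ===== LEMMAS AND PROOFS =====

-- A's loop body equals the single-test append body, so the fold builds list0 ++ filter.
theorem pvFoldA_eq (teta imagen : Int) (uvh : List Int) (cs : List Int) (acc : List Int) :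
    cs.foldl (fun acc i =>
        if i = imagen then acc
        else if teta ≤ PySem.List.pyGetD uvh i 0 then acc ++ [i] else acc) acc
      = acc ++ cs.filter (fun i => decide (i ≠ imagen ∧ teta ≤ PySem.List.pyGetD uvh i 0)) := by
  have h : (fun (acc : List Int) i =>
        if i = imagen then acc
        else if teta ≤ PySem.List.pyGetD uvh i 0 then acc ++ [i] else acc)
      = (fun acc i => if i ≠ imagen ∧ teta ≤ PySem.List.pyGetD uvh i 0 then acc ++ [i] else acc) := by
    funext a i
    by_cases h1 : i = imagen <;> by_cases h2 : teta ≤ PySem.List.pyGetD uvh i 0 <;>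
      simp [h1, h2]
  rw [h, PySem.List.foldl_append_ite_eq_filter]

-- B's counting pass counts the same selection.
theorem pvCountB_eq (teta imagen : Int) (uvh : List Int) (cs : List Int) :
    cs.foldl (fun c i => if i ≠ imagen ∧ teta ≤ PySem.List.pyGetD uvh i 0 then c + 1 else c) (0 : Int)
      = ((cs.filter (fun i => decide (i ≠ imagen ∧ teta ≤ PySem.List.pyGetD uvh i 0))).length : Int) := by
  rw [PySem.List.foldl_ite_add_one]
  simp [List.countP_eq_length_filter]

-- B's rank-walk returns the t-th element of the filtered candidate list (none past the end).
theorem pvPickB_spec (teta imagen : Int) (uvh : List Int) (cs : List Int) (t : Int) (ht : 0 ≤ t) :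
    pvPickB teta imagen uvh cs t
      = (cs.filter (fun i => decide (i ≠ imagen ∧ teta ≤ PySem.List.pyGetD uvh i 0)))[t.toNat]? := by
  induction cs generalizing t with
  | nil => simp [pvPickB]
  | cons i rest ih =>
    simp only [pvPickB]
    by_cases hp : i ≠ imagen ∧ teta ≤ PySem.List.pyGetD uvh i 0
    · rw [if_pos hp, List.filter_cons_of_pos (by simpa using hp)]
      by_cases ht0 : t = 0
      · subst ht0; simp
      · rw [if_neg ht0, ih (t - 1) (by omega)]
        have htn : t.toNat = (t - 1).toNat + 1 := by omega
        rw [htn, List.getElem?_cons_succ]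
    · rw [if_neg hp, List.filter_cons_of_neg (by simpa using hp), ih t ht]

theorem select_element_py_eq_alt (teta : Int) (uvh : List Int) (l : Int) (imagen : Int) :
    select_element_py teta uvh l imagen = select_element_py_alt teta uvh l imagen := by
  unfold select_element_py select_element_py_alt
  cases hv : PySem.List.pyGet? uvh imagen with
  | none => rfl
  | some v =>
    simp only
    rw [pvFoldA_eq, pvCountB_eq]
    simp only [PySem.List.len_eq]
    set F : List Int :=
      (PySem.List.pyRange 0 ((uvh.length : Int)) 1).filter
        (fun i => decide (i ≠ imagen ∧ teta ≤ PySem.List.pyGetD uvh i 0)) with hF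
    by_cases hvt : v < teta
    · simp only [hvt, if_true]
      have hlen : ([imagen] ++ F).length = F.length + 1 := by simp
      have he : (1 : Int) + (F.length : Int) = (([imagen] ++ F).length : Int) := by
        rw [hlen]; push_cast; ring
      rw [he]
      have hne : ((([imagen] ++ F).length : Int)) ≠ 0 := by rw [hlen]; push_cast; omega
      have hlz : ¬ ([imagen] ++ F).length = 0 := by omega
      rw [if_neg hlz, if_neg hne]
      have hpos : (0 : Int) < (([imagen] ++ F).length : Int) := by rw [hlen]; push_cast; omega
      set m : Int := PySem.Int.mod l (([imagen] ++ F).length : Int) with hm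
      have hm0 : 0 ≤ m := PySem.Int.mod_nonneg l hpos
      rw [PySem.List.pyGet?_of_nonneg _ hm0]
      by_cases hm00 : m = 0
      · rw [if_pos hm00, hm00]
        simp
      · rw [if_neg hm00, pvPickB_spec teta imagen uvh _ (m - 1) (by omega), ← hF,
          List.singleton_append]
        have htn : m.toNat = (m - 1).toNat + 1 := by omega
        rw [htn, List.getElem?_cons_succ]
    · simp only [hvt, if_false, List.nil_append, zero_add]
      by_cases hz : F.length = 0
      · have hzi : ((F.length : Int)) = 0 := by exact_mod_cast hz
        rw [if_pos hz, if_pos hzi]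
      · have hzi : ((F.length : Int)) ≠ 0 := by exact_mod_cast hz
        rw [if_neg hz, if_neg hzi]
        have hpos : (0 : Int) < (F.length : Int) := by omega
        have hm0 : 0 ≤ PySem.Int.mod l (F.length : Int) := PySem.Int.mod_nonneg l hpos
        rw [PySem.List.pyGet?_of_nonneg _ hm0,
          pvPickB_spec teta imagen uvh _ _ hm0, ← hF]

-- ===== VERDICT (by name: the statement is the Claim_ definition above) =====
theorem select_element_py_spec : Claim_equal_select_element_py := by
  intro teta uvh l imagen _ _
  unfold Spec_select_element_py
  exact select_element_py_eq_alt teta uvh l imagen
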